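-- pv_equiv track=rewrite | github.com/rohitnm/Hackerrank-Solutions | ProblemSolving-Algorithm/Even_Digits_4.py | digit_add
-- ===== SOURCE A (Python) =====
-- def digit_add(x):
--     ar = list(map(int, str(x)))
--     n = len(ar)
--     br = []
--     f = 0
--     for j in range(0, n):
--         if ar[j] % 2 == 0:
--             br.append(0)
--         else:
--             br.append(ar[j])
--             break
--     if sum(br) == 0:
--         return sum(br)
--     else:
--         br = []
--         for i in range(0, n):
--             if ar[i] % 2 != 0:
--                 z = ar[i] + 1
--                 f = ar.index(ar[i])
--                 br.append(z)
--                 break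
--             else:
--                 br.append(ar[i])
--         if n > 1:
--             for i in range(f+1, n):
--                 z = ar[i] - ar[i]
--                 br.append(z)
--         m = convert(br)
--         return m - x
--
-- def convert(l1):
--     s = [str(i) for i in l1]
--     res = int("".join(s))
--     return res
-- ===== SOURCE B (Python) =====
-- def digit_add(x):
--     ar = list(map(int, str(x)))
--     t = None   # transformed suffix built back-to-front; None = no odd digit seen yet
--     k = 0      # length of the suffix processed so far
--     for d in reversed(ar):
--         if d % 2:
--             t = [d + 1] + [0] * k   # d is the leftmost odd digit seen so far: it wins
--         elif t is not None:
--             t = [d] + t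
--         k += 1
--     if t is None:
--         return 0
--     return int("".join(map(str, t))) - x
-- ===== Notes on version B (the rewrite author's own statement) =====
-- stated objective: alternative
-- what changed: A makes three left-to-right passes (an odd-existence check via a sum, a rebuild pass with ar.index, and a zero-fill loop); B makes one right-to-left pass over the digits with an accumulator, building the transformed suffix back-to-front and letting the last odd digit processed (the leftmost one) overwrite it, relying on the fact that the leftmost odd digit wins.
import Mathlib
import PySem

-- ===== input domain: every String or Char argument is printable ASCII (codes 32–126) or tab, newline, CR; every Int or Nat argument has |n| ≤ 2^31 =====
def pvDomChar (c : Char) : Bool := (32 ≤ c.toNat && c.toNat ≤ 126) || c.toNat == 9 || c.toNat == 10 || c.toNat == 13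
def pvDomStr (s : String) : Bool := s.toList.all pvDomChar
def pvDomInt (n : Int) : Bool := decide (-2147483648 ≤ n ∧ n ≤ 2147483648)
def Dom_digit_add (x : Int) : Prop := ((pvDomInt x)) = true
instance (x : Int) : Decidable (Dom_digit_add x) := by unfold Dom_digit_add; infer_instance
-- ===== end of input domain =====

-- B replaces A's three left-to-right passes (existence check, rebuild with ar.index,
-- zero-fill) by ONE right-to-left pass with an accumulator: it builds the transformed
-- suffix back-to-front, the last odd digit processed (the leftmost one) overwriting it;
-- objective: alternative traversal, same value everywhere A returns.

-- ===== PORT A =====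
-- int(c) on a one-character string, exact via PySem.Int.ofStr?; Pre_ excludes x < 0,
-- where Python's int('-') raises ValueError (here the getD default is never reached inside Pre_).
def pvCharDigit (c : Char) : Int := (PySem.Int.ofStr? (String.ofList [c])).getD 0

-- first loop of A: zeros for the even prefix, then the first odd digit (break)
def pvLoop1 : List Int → List Int
  | [] => []
  | d :: rest => if d % 2 = 0 then 0 :: pvLoop1 rest else [d]

-- second loop of A: even prefix kept, first odd digit bumped, f = ar.index of it (break)
def pvLoop2 (ar : List Int) : List Int → List Int × Int
  | [] => ([], 0)
  | d :: rest =>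
    if d % 2 ≠ 0 then ([d + 1], (((PySem.List.index? ar d).getD 0 : Nat) : Int))
    else
      let p := pvLoop2 ar rest
      (d :: p.1, p.2)

-- third loop of A: for i in range(f+1, n): br.append(ar[i] - ar[i])
def pvFill (ar : List Int) (f n : Int) : List Int :=
  (PySem.List.pyRange (f + 1) n 1).foldl
    (fun br i => br ++ [PySem.List.pyGetD ar i 0 - PySem.List.pyGetD ar i 0]) []

-- convert: int("".join([str(i) for i in l1]))
def pvConvertA (l : List Int) : Int :=
  (PySem.Int.ofStr? (PySem.Str.join "" (l.map PySem.Int.toStr))).getD 0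

def digit_add (x : Int) : Int :=
  let ar := (PySem.Int.toStr x).toList.map pvCharDigit
  let n : Int := ar.length
  let br := pvLoop1 ar
  if br.sum = 0 then br.sum
  else
    let p := pvLoop2 ar ar
    let br2 := if n > 1 then p.1 ++ pvFill ar p.2 n else p.1
    pvConvertA br2 - x

-- ===== PORT B =====
-- int("".join(map(str, t)))
def pvConvertB (l : List Int) : Int :=
  (PySem.Int.ofStr? (PySem.Str.join "" (l.map PySem.Int.toStr))).getD 0

-- one iteration of B's loop over reversed(ar): state = (t, k)
def pvAltStep (st : Option (List Int) × Int) (d : Int) : Option (List Int) × Int :=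
  (if d % 2 ≠ 0 then some ((d + 1) :: List.replicate st.2.toNat 0)
   else match st.1 with
     | some t => some (d :: t)
     | none => none,
   st.2 + 1)

def digit_add_alt (x : Int) : Int :=
  let ar := (PySem.Int.toStr x).toList.map pvCharDigit
  let st := ar.reverse.foldl pvAltStep (none, 0)
  match st.1 with
  | none => 0
  | some t => pvConvertB t - x

-- ===== PRECONDITION & SPEC =====
-- Pre_ excludes x < 0: there str(x) starts with '-' and list(map(int, str(x))) raises ValueError in A (and in B alike).
def Pre_digit_add (x : Int) : Prop := 0 ≤ x
instance (x : Int) : Decidable (Pre_digit_add x) := by unfold Pre_digit_add; infer_instance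
def pvWitness_digit_add : Int := 1234
def Spec_digit_add (x : Int) (out : Int) : Prop := out = digit_add_alt x
instance (x : Int) (out : Int) : Decidable (Spec_digit_add x out) := by unfold Spec_digit_add; infer_instance

-- ===== CLAIM (what is proved, stated in full; the proofs are below) =====
def Claim_equal_digit_add : Prop := ∀ (x : Int), Dom_digit_add x → Pre_digit_add x → Spec_digit_add x (digit_add x)

-- ===== LEMMAS AND PROOFS =====

theorem pvLoop1_even (ar : List Int) (h : ∀ d ∈ ar, d % 2 = 0) : (pvLoop1 ar).sum = 0 := by
  induction ar with
  | nil => simp [pvLoop1]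
  | cons d rest ih =>
    have hd := h d (by simp)
    simp only [pvLoop1, if_pos hd, List.sum_cons]
    rw [ih (fun e he => h e (by simp [he]))]
    simp

theorem pvLoop1_split (pre : List Int) (d : Int) (post : List Int)
    (hpre : ∀ e ∈ pre, e % 2 = 0) (hd : d % 2 ≠ 0) :
    (pvLoop1 (pre ++ d :: post)).sum = d := by
  induction pre with
  | nil =>
    rw [List.nil_append]
    simp only [pvLoop1]
    rw [if_neg hd]
    simp
  | cons e pre ih =>
    have he := hpre e (by simp)
    simp only [List.cons_append, pvLoop1, if_pos he, List.sum_cons]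
    rw [ih (fun a ha => hpre a (by simp [ha]))]
    simp

theorem pvLoop2_split (ar : List Int) (pre : List Int) (d : Int) (post : List Int)
    (hpre : ∀ e ∈ pre, e % 2 = 0) (hd : d % 2 ≠ 0) :
    pvLoop2 ar (pre ++ d :: post) =
      (pre ++ [d + 1], (((PySem.List.index? ar d).getD 0 : Nat) : Int)) := by
  induction pre with
  | nil =>
    rw [List.nil_append]
    simp only [pvLoop2]
    rw [if_pos hd]
    simp
  | cons e pre ih =>
    have he := hpre e (by simp)
    simp only [List.cons_append, pvLoop2]
    rw [if_neg (by omega)]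
    rw [ih (fun a ha => hpre a (by simp [ha]))]

theorem pvFill_replicate (ar : List Int) (f n : Int) :
    pvFill ar f n = List.replicate ((n - (f + 1)).toNat) 0 := by
  have key : ∀ (L : List Int) (acc : List Int),
      L.foldl (fun br i => br ++ [PySem.List.pyGetD ar i 0 - PySem.List.pyGetD ar i 0]) acc
        = acc ++ List.replicate L.length 0 := by
    intro L
    induction L with
    | nil => intro acc; simp
    | cons i L ih =>
      intro acc
      rw [List.foldl_cons, ih]
      simp [List.replicate_succ]
  unfold pvFill
  rw [key, PySem.List.length_pyRange_one]
  simp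

theorem index?_first_odd (pre : List Int) (d : Int) (post : List Int)
    (hpre : ∀ e ∈ pre, e % 2 = 0) (hd : d % 2 ≠ 0) :
    PySem.List.index? (pre ++ d :: post) d = some pre.length := by
  apply (PySem.List.index?_eq_some_iff _ _ _).mpr
  refine ⟨pre, post, rfl, rfl, ?_⟩
  intro hmem
  exact hd (hpre d hmem)

theorem pvConvert_eq : ∀ l, pvConvertA l = pvConvertB l := fun _ => rfl

theorem exists_first_odd (ar : List Int) (h : ¬ ∀ d ∈ ar, d % 2 = 0) :
    ∃ pre d post, ar = pre ++ d :: post ∧ (∀ e ∈ pre, e % 2 = 0) ∧ d % 2 ≠ 0 := by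
  induction ar with
  | nil => exact absurd (by simp) h
  | cons a rest ih =>
    by_cases ha : a % 2 = 0
    · have hr : ¬ ∀ d ∈ rest, d % 2 = 0 := by
        intro hr
        apply h
        intro e he
        rcases List.mem_cons.mp he with h1 | h2
        · exact h1 ▸ ha
        · exact hr e h2
      obtain ⟨pre, d, post, h1, h2, h3⟩ := ih hr
      refine ⟨a :: pre, d, post, by simp [h1], ?_, h3⟩
      intro e he
      rcases List.mem_cons.mp he with h4 | h5
      · exact h4 ▸ ha
      · exact h2 e h5
    · exact ⟨[], a, rest, rfl, by simp, ha⟩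

-- k-component of B's state: it just counts processed digits
theorem pvAltStep_snd (m : List Int) (s : Option (List Int) × Int) :
    (m.foldl pvAltStep s).2 = s.2 + m.length := by
  induction m generalizing s with
  | nil => simp
  | cons d m ih =>
    rw [List.foldl_cons, ih]
    simp [pvAltStep]
    ring

-- B's fold over even digits starting with no odd seen: state stays none
theorem pvFold_none_even (m : List Int) (k : Int) (h : ∀ d ∈ m, d % 2 = 0) :
    m.foldl pvAltStep (none, k) = (none, k + m.length) := by
  induction m generalizing k with
  | nil => simp
  | cons d m ih =>
    have hd := h d (by simp)
    rw [List.foldl_cons]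
    have hstep : pvAltStep (none, k) d = (none, k + 1) := by
      simp [pvAltStep, hd]
    rw [hstep, ih (k + 1) (fun e he => h e (by simp [he]))]
    simp
    ring

-- B's fold over even digits with a transformed suffix already built: each digit is prepended
theorem pvFold_some_even (m : List Int) (t : List Int) (k : Int) (h : ∀ d ∈ m, d % 2 = 0) :
    m.foldl pvAltStep (some t, k) = (some (m.reverse ++ t), k + m.length) := by
  induction m generalizing t k with
  | nil => simp
  | cons d m ih =>
    have hd := h d (by simp)
    rw [List.foldl_cons]
    have hstep : pvAltStep (some t, k) d = (some (d :: t), k + 1) := by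
      simp [pvAltStep, hd]
    rw [hstep, ih (d :: t) (k + 1) (fun e he => h e (by simp [he]))]
    simp
    ring

-- B's whole fold on pre ++ d :: post (pre even, d the first odd digit)
theorem pvFold_split (pre : List Int) (d : Int) (post : List Int)
    (hpre : ∀ e ∈ pre, e % 2 = 0) (hd : d % 2 ≠ 0) :
    ((pre ++ d :: post).reverse.foldl pvAltStep (none, 0)).1 =
      some (pre ++ (d + 1) :: List.replicate post.length 0) := by
  have hrev : (pre ++ d :: post).reverse = post.reverse ++ d :: pre.reverse := by
    simp
  rw [hrev, List.foldl_append, List.foldl_cons]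
  rcases hs : post.reverse.foldl pvAltStep (none, 0) with ⟨t0, k0⟩
  have hk : k0 = (post.length : Int) := by
    have := pvAltStep_snd post.reverse (none, 0)
    rw [hs] at this
    simpa using this
  have hstep : pvAltStep (t0, k0) d =
      (some ((d + 1) :: List.replicate post.length 0), (post.length : Int) + 1) := by
    subst hk
    simp [pvAltStep, hd]
  rw [hstep]
  have hpre' : ∀ e ∈ pre.reverse, e % 2 = 0 := fun e he => hpre e (List.mem_reverse.mp he)
  rw [pvFold_some_even pre.reverse _ _ hpre']
  simp

theorem core_eq (x : Int) (ar : List Int) :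
    (let n : Int := ar.length
     let br := pvLoop1 ar
     if br.sum = 0 then br.sum
     else
       let p := pvLoop2 ar ar
       let br2 := if n > 1 then p.1 ++ pvFill ar p.2 n else p.1
       pvConvertA br2 - x)
    = (let st := ar.reverse.foldl pvAltStep (none, 0)
       match st.1 with
       | none => 0
       | some t => pvConvertB t - x) := by
  by_cases hall : ∀ d ∈ ar, d % 2 = 0
  · have hb : (ar.reverse.foldl pvAltStep (none, 0)).1 = none := by
      rw [pvFold_none_even ar.reverse 0 (fun e he => hall e (List.mem_reverse.mp he))]
    show (if (pvLoop1 ar).sum = 0 then (pvLoop1 ar).sum else _) = _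
    rw [pvLoop1_even ar hall, if_pos rfl]
    show (0 : Int) = (match (ar.reverse.foldl pvAltStep (none, 0)).1 with
       | none => (0 : Int)
       | some t => pvConvertB t - x)
    rw [hb]
  · obtain ⟨pre, d, post, har, hpre, hd⟩ := exists_first_odd ar hall
    subst har
    have hsum : (pvLoop1 (pre ++ d :: post)).sum = d := pvLoop1_split pre d post hpre hd
    have hd0 : d ≠ 0 := by omega
    have hb := pvFold_split pre d post hpre hd
    show (if (pvLoop1 (pre ++ d :: post)).sum = 0 then (pvLoop1 (pre ++ d :: post)).sum
      else pvConvertA (if ((pre ++ d :: post).length : Int) > 1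
        then (pvLoop2 (pre ++ d :: post) (pre ++ d :: post)).1 ++
          pvFill (pre ++ d :: post) (pvLoop2 (pre ++ d :: post) (pre ++ d :: post)).2
            ((pre ++ d :: post).length : Int)
        else (pvLoop2 (pre ++ d :: post) (pre ++ d :: post)).1) - x) = _
    rw [hsum, if_neg hd0]
    show _ = (match ((pre ++ d :: post).reverse.foldl pvAltStep (none, 0)).1 with
       | none => (0 : Int)
       | some t => pvConvertB t - x)
    rw [hb]
    rw [pvLoop2_split (pre ++ d :: post) pre d post hpre hd]
    rw [index?_first_odd pre d post hpre hd]
    simp only [Option.getD_some]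
    by_cases hn : ((pre ++ d :: post).length : Int) > 1
    · rw [if_pos hn]
      rw [pvFill_replicate, pvConvert_eq]
      have hrep : ((((pre ++ d :: post).length : Int)) - (((pre.length : Nat) : Int) + 1)).toNat
          = post.length := by
        simp only [List.length_append, List.length_cons]
        push_cast
        omega
      rw [hrep]
      simp
    · rw [if_neg hn]
      have hlen : pre.length = 0 ∧ post.length = 0 := by
        simp only [not_lt, List.length_append, List.length_cons] at hn
        constructor <;> omega
      have hp : pre = [] := List.eq_nil_of_length_eq_zero hlen.1
      have hq : post = [] := List.eq_nil_of_length_eq_zero hlen.2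
      subst hp; subst hq
      rw [pvConvert_eq]
      simp

-- ===== VERDICT (by name: the statement is the Claim_ definition above) =====
theorem digit_add_spec : Claim_equal_digit_add := by
  intro x _ _
  unfold Spec_digit_add digit_add digit_add_alt
  exact core_eq x _
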